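-- pv_equiv track=rewrite | github.com/ajarac/advent_of_code | 2015/day01/solution.py | part2
-- ===== SOURCE A (Python) =====
-- def part2(input_text: str) -> str:
--     floor = 0
--     index = 0
--     for i, char in enumerate(input_text):
--         if char == '(':
--             floor += 1
--         elif char == ')':
--             floor -= 1
--         if floor == -1:
--             index = i + 1
--             break
--     return f"index: {index}"
-- ===== SOURCE B (Python) =====
-- def part2(input_text: str) -> str:
--     deltas = [1 if c == '(' else -1 if c == ')' else 0 for c in input_text]
--     floors = []
--     running = 0
--     for d in deltas:
--         running += d
--         floors.append(running)
--     try: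
--         pos = floors.index(-1) + 1
--     except ValueError:
--         pos = 0
--     return f"index: {pos}"
-- ===== Notes on version B (the rewrite author's own statement) =====
-- stated objective: alternative
-- what changed: Replaced A's fused scan-with-break loop by a two-phase computation: map characters to deltas, materialise the prefix-sum list of running floors, then .index(-1) on that table (defaulting to 0 via ValueError) to get the position.
import Mathlib
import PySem

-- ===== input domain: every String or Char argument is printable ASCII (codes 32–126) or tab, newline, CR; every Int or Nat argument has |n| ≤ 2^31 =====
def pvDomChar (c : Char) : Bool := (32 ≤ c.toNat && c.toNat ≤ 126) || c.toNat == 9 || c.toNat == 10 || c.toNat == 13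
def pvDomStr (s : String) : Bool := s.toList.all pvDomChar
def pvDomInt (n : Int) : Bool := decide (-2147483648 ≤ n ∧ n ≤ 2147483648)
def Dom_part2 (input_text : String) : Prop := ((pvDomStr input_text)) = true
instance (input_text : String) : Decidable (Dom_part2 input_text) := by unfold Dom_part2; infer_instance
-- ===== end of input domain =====

-- B builds the explicit prefix-sum table of floors and searches it with .index(-1) (default 0), replacing A's fused scan-and-break loop; objective: alternative decomposition.

-- ===== PORT A =====
-- A's for-loop with break: first index i with floor = -1 gives i+1, else index stays 0.
def part2Loop (cs : List Char) (floor : Int) (i : Nat) : Int :=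
  match cs with
  | [] => 0
  | c :: rest =>
    let f := if c = '(' then floor + 1 else if c = ')' then floor - 1 else floor
    if f = -1 then (i : Int) + 1 else part2Loop rest f (i + 1)

def part2 (input_text : String) : String :=
  "index: " ++ PySem.Int.toStr (part2Loop input_text.toList 0 0)

-- ===== PORT B =====
def part2Deltas (cs : List Char) : List Int :=
  cs.map (fun c => if c = '(' then 1 else if c = ')' then -1 else 0)

def part2Floors (ds : List Int) (running : Int) : List Int :=
  match ds with
  | [] => []
  | d :: rest => (running + d) :: part2Floors rest (running + d)

def part2_alt (input_text : String) : String :=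
  let floors := part2Floors (part2Deltas input_text.toList) 0
  let pos : Int :=
    match PySem.List.index? floors (-1) with
    | some k => (k : Int) + 1
    | none => 0
  "index: " ++ PySem.Int.toStr pos

-- ===== PRECONDITION & SPEC =====
def Spec_part2 (input_text : String) (out : String) : Prop := out = part2_alt input_text
instance (input_text : String) (out : String) : Decidable (Spec_part2 input_text out) := by unfold Spec_part2; infer_instance

-- ===== CLAIM (what is proved, stated in full; the proofs are below) =====
def Claim_equal_part2 : Prop := ∀ (input_text : String), Dom_part2 input_text → Spec_part2 input_text (part2 input_text)

-- ===== LEMMAS AND PROOFS =====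
theorem part2Deltas_cons (c : Char) (rest : List Char) :
    part2Deltas (c :: rest) = (if c = '(' then (1:Int) else if c = ')' then -1 else 0) :: part2Deltas rest := rfl

theorem part2Floors_cons (d : Int) (ds : List Int) (r : Int) :
    part2Floors (d :: ds) r = (r + d) :: part2Floors ds (r + d) := rfl

theorem part2_loop_eq (cs : List Char) (floor : Int) (i : Nat) :
    part2Loop cs floor i =
      match PySem.List.index? (part2Floors (part2Deltas cs) floor) (-1) with
      | some k => (i : Int) + (k : Int) + 1
      | none => 0 := by
  induction cs generalizing floor i with
  | nil => simp [part2Loop, part2Deltas, part2Floors]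
  | cons c rest ih =>
    rw [part2Deltas_cons, part2Floors_cons]
    simp only [part2Loop]
    by_cases h : (if c = '(' then floor + 1 else if c = ')' then floor - 1 else floor) = -1
    · have hd : floor + (if c = '(' then (1:Int) else if c = ')' then -1 else 0) = -1 := by
        split_ifs at h ⊢ <;> omega
      rw [if_pos h, hd, PySem.List.index?_cons_self]
      simp
    · have hd : floor + (if c = '(' then (1:Int) else if c = ')' then -1 else 0) ≠ -1 := by
        split_ifs at h ⊢ <;> omega
      have harg : (if c = '(' then floor + 1 else if c = ')' then floor - 1 else floor)
          = floor + (if c = '(' then (1:Int) else if c = ')' then -1 else 0) := by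
        split_ifs <;> ring
      rw [if_neg h, PySem.List.index?_cons_of_ne _ hd, ih, harg]
      cases PySem.List.index? (part2Floors (part2Deltas rest) (floor + (if c = '(' then (1:Int) else if c = ')' then -1 else 0))) (-1) with
      | none => simp
      | some k => simp; ring

-- ===== VERDICT (by name: the statement is the Claim_ definition above) =====
theorem part2_spec : Claim_equal_part2 := by
  intro s _
  unfold Spec_part2 part2 part2_alt
  rcases h : List.idxOf? (-1) (part2Floors (part2Deltas s.toList) 0) with _ | k <;>
    simp [part2_loop_eq, PySem.List.index?_eq_idxOf?, h]
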